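-- pv_equiv track=rewrite | github.com/aihpi/workshop-ragV2 | backend/app/services/chat_history.py | _get_next_node_ids
-- ===== SOURCE A (Python) =====
-- from typing import List, Dict, Optional, Tuple
--
-- def _get_next_node_ids(nodes: List[Dict]) -> Tuple[int, int]:
--     """Get next query and response node numbers.
--
--     Args:
--         nodes: Existing nodes
--
--     Returns:
--         Tuple of (next_query_num, next_response_num)
--     """
--     max_q = 0
--     max_r = 0
--     for node in nodes:
--         node_id = node.get("node_id", "")
--         if node_id.startswith("q"):
--             try:
--                 num = int(node_id[1:].split("_")[0])  # Handle q1, q1_v2, etc.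
--                 max_q = max(max_q, num)
--             except ValueError:
--                 pass
--         elif node_id.startswith("r"):
--             try:
--                 num = int(node_id[1:].split("_")[0])
--                 max_r = max(max_r, num)
--             except ValueError:
--                 pass
--     return max_q + 1, max_r + 1
-- ===== SOURCE B (Python) =====
-- from typing import List, Dict, Tuple
--
-- def _get_next_node_ids(nodes: List[Dict]) -> Tuple[int, int]:
--     """Get next query and response node numbers (two filtered scans)."""
--     def _max_num(prefix: str) -> int:
--         values = [0]
--         for node in nodes:
--             node_id = node.get("node_id", "")
--             if node_id.startswith(prefix):
--                 try:
--                     values.append(int(node_id[1:].split("_")[0]))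
--                 except ValueError:
--                     pass
--         return max(values)
--     return _max_num("q") + 1, _max_num("r") + 1
-- ===== Notes on version B (the rewrite author's own statement) =====
-- stated objective: simpler
-- what changed: Replaces the single combined scan carrying a (max_q, max_r) pair with a local helper that, per prefix, collects the parsed numbers of matching node ids into a list and takes its max; the result is (_max_num('q')+1, _max_num('r')+1).
import Mathlib
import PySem

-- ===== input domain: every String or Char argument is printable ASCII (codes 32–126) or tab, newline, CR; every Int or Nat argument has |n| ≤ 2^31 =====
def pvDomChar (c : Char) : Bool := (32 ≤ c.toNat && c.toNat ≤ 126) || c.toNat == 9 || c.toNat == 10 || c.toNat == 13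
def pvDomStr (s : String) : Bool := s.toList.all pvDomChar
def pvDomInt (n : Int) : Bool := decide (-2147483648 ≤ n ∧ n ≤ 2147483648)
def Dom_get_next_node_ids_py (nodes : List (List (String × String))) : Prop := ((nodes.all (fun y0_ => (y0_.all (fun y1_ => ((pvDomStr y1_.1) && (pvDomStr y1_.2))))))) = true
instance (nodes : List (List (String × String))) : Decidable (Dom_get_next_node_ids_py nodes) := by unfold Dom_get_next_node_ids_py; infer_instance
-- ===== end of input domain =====

-- B is a simpler decomposition: one helper computing, per prefix, the max of the parsed numbers, instead of one combined scan over a pair of running maxima.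

-- node.get("node_id", "")
def pvNodeId (node : List (String × String)) : String :=
  PySem.Dict.getD (PySem.Dict.mk node) "node_id" ""

-- int(node_id[1:].split("_")[0]); none = ValueError
def pvParse (node_id : String) : Option Int :=
  match PySem.Str.split? (PySem.Str.slice node_id (some 1) none) "_" with
  | some (p :: _) => PySem.Int.ofStr? p
  | _ => none

-- ===== PORT A =====
-- the body of A's single for-loop over the running pair (max_q, max_r)
def pvAStep (st : Int × Int) (node : List (String × String)) : Int × Int :=
  let node_id := pvNodeId node
  if PySem.Str.startswith node_id "q" then
    match pvParse node_id with
    | some num => (max st.1 num, st.2)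
    | none => st
  else if PySem.Str.startswith node_id "r" then
    match pvParse node_id with
    | some num => (st.1, max st.2 num)
    | none => st
  else st

def get_next_node_ids_py (nodes : List (List (String × String))) : Int × Int :=
  let st := nodes.foldl pvAStep (0, 0)
  (st.1 + 1, st.2 + 1)

-- ===== PORT B =====
-- the body of _max_num's for-loop: append the parsed number when the id matches pfx
def pvBStep (pfx : String) (acc : List Int) (node : List (String × String)) : List Int :=
  let node_id := pvNodeId node
  if PySem.Str.startswith node_id pfx then
    match pvParse node_id with
    | some n => acc ++ [n]
    | none => acc
  else acc

def pvMaxNum (nodes : List (List (String × String))) (pfx : String) : Int :=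
  ((nodes.foldl (pvBStep pfx) [0]).max?).getD 0

def get_next_node_ids_py_alt (nodes : List (List (String × String))) : Int × Int :=
  (pvMaxNum nodes "q" + 1, pvMaxNum nodes "r" + 1)

-- ===== PRECONDITION & SPEC =====
def Spec_get_next_node_ids_py (nodes : List (List (String × String))) (out : Int × Int) : Prop := out = get_next_node_ids_py_alt nodes
instance (nodes : List (List (String × String))) (out : Int × Int) : Decidable (Spec_get_next_node_ids_py nodes out) := by unfold Spec_get_next_node_ids_py; infer_instance

-- ===== CLAIM (what is proved, stated in full; the proofs are below) =====
def Claim_equal_get_next_node_ids_py : Prop := ∀ (nodes : List (List (String × String))), Dom_get_next_node_ids_py nodes → Spec_get_next_node_ids_py nodes (get_next_node_ids_py nodes)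

-- ===== LEMMAS AND PROOFS =====

-- the parsed number contributed by a node for a given prefix (none if no match / ValueError)
def pvNum (pfx : String) (node : List (String × String)) : Option Int :=
  if PySem.Str.startswith (pvNodeId node) pfx then pvParse (pvNodeId node) else none

theorem pv_startswith_qr (s : String) (h : PySem.Str.startswith s "q" = true) :
    PySem.Str.startswith s "r" = false := by
  simp [PySem.Str.startswith, PySem.Chars.startswith] at *
  cases hs : s.toList with
  | nil => simp [hs] at h
  | cons c cs =>
    simp [hs, List.isPrefixOf] at h ⊢
    subst h; decide

theorem pvB_foldl (pfx : String) (nodes : List (List (String × String))) (acc : List Int) :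
    nodes.foldl (pvBStep pfx) acc = acc ++ nodes.filterMap (pvNum pfx) := by
  induction nodes generalizing acc with
  | nil => simp
  | cons node rest ih =>
    rw [List.foldl_cons, ih, List.filterMap_cons]
    by_cases hq : PySem.Str.startswith (pvNodeId node) pfx = true
    · cases hp : pvParse (pvNodeId node) with
      | none => simp only [pvBStep, pvNum, hq, hp, if_true]
      | some n => simp only [pvBStep, pvNum, hq, hp, if_true]; simp
    · rw [Bool.not_eq_true] at hq
      simp only [pvBStep, pvNum, hq, Bool.false_eq_true, if_false]

theorem pvA_foldl (nodes : List (List (String × String))) (a b : Int) :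
    nodes.foldl pvAStep (a, b) =
      ((nodes.filterMap (pvNum "q")).foldl max a, (nodes.filterMap (pvNum "r")).foldl max b) := by
  induction nodes generalizing a b with
  | nil => simp
  | cons node rest ih =>
    rw [List.foldl_cons, List.filterMap_cons, List.filterMap_cons]
    by_cases hq : PySem.Str.startswith (pvNodeId node) "q" = true
    · have hr := pv_startswith_qr (pvNodeId node) hq
      cases hp : pvParse (pvNodeId node) with
      | none =>
        have hstep : pvAStep (a, b) node = (a, b) := by
          simp only [pvAStep, hq, hp, if_true]
        rw [hstep, ih]
        simp only [pvNum, hq, hr, hp, if_true, Bool.false_eq_true, if_false]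
      | some n =>
        have hstep : pvAStep (a, b) node = (max a n, b) := by
          simp only [pvAStep, hq, hp, if_true]
        rw [hstep, ih]
        simp only [pvNum, hq, hr, hp, if_true, Bool.false_eq_true, if_false]
        rw [List.foldl_cons]
    · rw [Bool.not_eq_true] at hq
      by_cases hr : PySem.Str.startswith (pvNodeId node) "r" = true
      · cases hp : pvParse (pvNodeId node) with
        | none =>
          have hstep : pvAStep (a, b) node = (a, b) := by
            simp only [pvAStep, hq, hr, hp, Bool.false_eq_true, if_false, if_true]
          rw [hstep, ih]
          simp only [pvNum, hq, hr, hp, if_true, Bool.false_eq_true, if_false]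
        | some n =>
          have hstep : pvAStep (a, b) node = (a, max b n) := by
            simp only [pvAStep, hq, hr, hp, Bool.false_eq_true, if_false, if_true]
          rw [hstep, ih]
          simp only [pvNum, hq, hr, hp, if_true, Bool.false_eq_true, if_false]
          rw [List.foldl_cons]
      · rw [Bool.not_eq_true] at hr
        have hstep : pvAStep (a, b) node = (a, b) := by
          unfold pvAStep
          dsimp only []
          rw [hq, hr]
          simp
        rw [hstep, ih]
        simp only [pvNum, hq, hr, Bool.false_eq_true, if_false]

theorem pv_max_getD (L : List Int) : ((([0] : List Int) ++ L).max?).getD 0 = L.foldl max 0 := by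
  rw [List.singleton_append]
  rfl

-- ===== VERDICT (by name: the statement is the Claim_ definition above) =====
theorem get_next_node_ids_py_spec : Claim_equal_get_next_node_ids_py := by
  intro nodes _
  unfold Spec_get_next_node_ids_py get_next_node_ids_py get_next_node_ids_py_alt pvMaxNum
  simp only [pvA_foldl, pvB_foldl, pv_max_getD]
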